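-- pv_equiv track=rewrite | github.com/abdullahau/Data-Structures-and-Algorithms-Spring-2024 | Exercises/Week 4/sublists.py | count
-- ===== SOURCE A (Python) =====
-- def count(t):
--     n = len(t)
--     prefix_sum = 0
--     prefix_sum_map = {0: [-1]}
--     counter = 0
--
--     for i in range(n):
--         prefix_sum += t[i]
--
--         if prefix_sum in prefix_sum_map:
--             for j in prefix_sum_map[prefix_sum]:
--                 if t[j + 1] == t[i]:
--                     counter += 1
--             prefix_sum_map[prefix_sum].append(i)
--         else:
--             prefix_sum_map[prefix_sum] = [i]
--
--     return counter
-- ===== SOURCE B (Python) =====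
-- def count(t):
--     cnt = {}
--     prefix_sum = 0
--     counter = 0
--     for x in t:
--         k = (prefix_sum, x)
--         cnt[k] = cnt.get(k, 0) + 1
--         prefix_sum += x
--         counter += cnt.get((prefix_sum, x), 0)
--     return counter
-- ===== Notes on version B (the rewrite author's own statement) =====
-- stated objective: alternative
-- what changed: Replaces the per-prefix-sum list of indices with its inner scan (and the -1 sentinel entry) by a single counting dict keyed by (prefix_sum, boundary value), so each step is one lookup of a maintained count instead of a scan over all earlier indices with the same prefix sum.
import Mathlib
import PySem

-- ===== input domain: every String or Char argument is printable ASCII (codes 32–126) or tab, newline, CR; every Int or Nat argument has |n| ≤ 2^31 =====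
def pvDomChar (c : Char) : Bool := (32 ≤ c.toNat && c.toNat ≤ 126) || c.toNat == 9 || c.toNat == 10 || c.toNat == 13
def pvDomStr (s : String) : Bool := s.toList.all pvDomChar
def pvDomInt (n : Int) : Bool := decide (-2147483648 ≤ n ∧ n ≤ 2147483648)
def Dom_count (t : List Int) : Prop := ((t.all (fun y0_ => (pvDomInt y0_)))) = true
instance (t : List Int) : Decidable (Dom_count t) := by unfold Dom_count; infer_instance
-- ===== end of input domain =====

-- B replaces A's per-prefix-sum index lists (inner scan) by one counting dict keyed by
-- (prefix sum, boundary value): a structurally different re-implementation with the same result.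

-- ===== PORT A =====
-- loop body of A's `for i in range(n)` (state: prefix_sum, prefix_sum_map, counter)
def countStepA (t : List Int) (st : Int × PySem.Dict Int (List Int) × Int) (i : Int) :
    Int × PySem.Dict Int (List Int) × Int :=
  let ps := st.1 + PySem.List.pyGetD t i 0
  match (st.2.1).get? ps with
  | some js =>
      (ps, (st.2.1).insert ps (js ++ [i]),
        js.foldl (fun c j =>
          if PySem.List.pyGetD t (j + 1) 0 = PySem.List.pyGetD t i 0 then c + 1 else c) st.2.2)
  | none => (ps, (st.2.1).insert ps [i], st.2.2)

def count (t : List Int) : Int :=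
  let n : Int := t.length
  ((PySem.List.pyRange 0 n 1).foldl (countStepA t)
    (0, (PySem.Dict.empty : PySem.Dict Int (List Int)).insert 0 [-1], 0)).2.2

-- ===== PORT B =====
-- loop body of B's `for x in t` (state: cnt, prefix_sum, counter)
def countStepB (st : PySem.Dict (Int × Int) Int × Int × Int) (x : Int) :
    PySem.Dict (Int × Int) Int × Int × Int :=
  let cnt := st.1.insert (st.2.1, x) (st.1.getD (st.2.1, x) 0 + 1)
  let ps := st.2.1 + x
  (cnt, ps, st.2.2 + cnt.getD (ps, x) 0)

def count_alt (t : List Int) : Int :=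
  (t.foldl countStepB ((PySem.Dict.empty : PySem.Dict (Int × Int) Int), 0, 0)).2.2

-- ===== PRECONDITION & SPEC =====
def Spec_count (t : List Int) (out : Int) : Prop := out = count_alt t
instance (t : List Int) (out : Int) : Decidable (Spec_count t out) := by unfold Spec_count; infer_instance

-- ===== CLAIM (what is proved, stated in full; the proofs are below) =====
def Claim_equal_count : Prop := ∀ (t : List Int), Dom_count t → Spec_count t (count t)

-- ===== LEMMAS AND PROOFS =====

-- number of registered boundaries: a ∈ [0, h.length) with prefix-sum(h, a) = s and h[a] = v
def countRegs (h : List Int) (s v : Int) : Int :=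
  ((List.range h.length).countP
    (fun a => decide ((h.take a).sum = s) && decide (h.getD a 0 = v)) : Nat)

-- A's stored index list for key s, after processing prefix `h` (j = a - 1, a ∈ [0, h.length])
def regsA (h : List Int) (s : Int) : List Int :=
  (List.range (h.length + 1)).filterMap
    (fun a => if (h.take a).sum = s then some ((a : Int) - 1) else none)

-- the common mathematical value both loops accumulate
def specCount (h rest : List Int) : Int :=
  match rest with
  | [] => 0
  | x :: rest => countRegs (h ++ [x]) (h.sum + x) x + specCount (h ++ [x]) rest

theorem countRegs_append (h : List Int) (x s v : Int) :
    countRegs (h ++ [x]) s v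
      = countRegs h s v + (if h.sum = s ∧ x = v then 1 else 0) := by
  unfold countRegs
  rw [List.length_append]
  simp only [List.length_cons, List.length_nil]
  rw [List.range_succ, List.countP_append]
  have h1 : (List.range h.length).countP
      (fun a => decide (((h ++ [x]).take a).sum = s) && decide ((h ++ [x]).getD a 0 = v))
      = (List.range h.length).countP
      (fun a => decide ((h.take a).sum = s) && decide (h.getD a 0 = v)) := by
    apply List.countP_congr
    intro a ha
    have ha' : a < h.length := List.mem_range.mp ha
    rw [List.take_append_of_le_length (by omega), List.getD_append _ _ _ _ ha']
  rw [h1]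
  have h2 : ((h ++ [x]).take h.length).sum = h.sum := by
    rw [List.take_append_of_le_length (le_refl _), List.take_length]
  have h3 : (h ++ [x]).getD h.length 0 = x := by
    rw [List.getD_append_right _ _ _ _ (le_refl _)]
    simp
  simp only [List.countP_cons, List.countP_nil, h2, h3]
  by_cases hc : h.sum = s ∧ x = v
  · simp [hc.1, hc.2]
  · rcases Decidable.not_and_iff_not_or_not.mp hc with hc' | hc' <;> simp [hc']

theorem regsA_append (h : List Int) (x s : Int) :
    regsA (h ++ [x]) s
      = regsA h s ++ (if h.sum + x = s then [(h.length : Int)] else []) := by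
  unfold regsA
  rw [List.length_append]
  simp only [List.length_cons, List.length_nil]
  have : h.length + 1 + 1 = (h.length + 1) + 1 := rfl
  rw [this, List.range_succ, List.filterMap_append]
  congr 1
  · apply List.filterMap_congr
    intro a ha
    have ha' : a < h.length + 1 := List.mem_range.mp ha
    rw [List.take_append_of_le_length (by omega)]
  · have h2 : ((h ++ [x]).take (h.length + 1)).sum = h.sum + x := by
      rw [show h.length + 1 = (h ++ [x]).length by simp, List.take_length]; simp
    simp only [List.filterMap_cons, List.filterMap_nil, h2]
    by_cases hc : h.sum + x = s
    · simp [hc]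
    · simp [hc]

-- counting over a filterMap of the if-some-none shape
theorem countP_filterMap_if {α β : Type} (l : List α) (q : α → Prop) [DecidablePred q]
    (g : α → β) (p : β → Bool) :
    (l.filterMap (fun a => if q a then some (g a) else none)).countP p
      = l.countP (fun a => decide (q a) && p (g a)) := by
  induction l with
  | nil => rfl
  | cons a l ih =>
      by_cases hq : q a
      · simp [hq, List.countP_cons, ih]
      · simp [hq, ih]

theorem foldl_count (l : List Int) (p : Int → Prop) [DecidablePred p] (c : Int) :
    l.foldl (fun c j => if p j then c + 1 else c) c
      = c + ((l.countP (fun j => decide (p j)) : Nat) : Int) := by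
  induction l generalizing c with
  | nil => simp
  | cons j l ih =>
      simp only [List.foldl_cons, List.countP_cons, ih]
      by_cases hp : p j
      · simp [hp]; ring
      · simp [hp]

-- linking A's inner scan with countRegs on the extended prefix
theorem countP_regsA (h rest : List Int) (x s : Int) :
    ((regsA h s).countP
        (fun j => decide (PySem.List.pyGetD (h ++ x :: rest) (j + 1) 0 = x)) : Int)
      = countRegs (h ++ [x]) s x := by
  unfold regsA countRegs
  rw [List.length_append]
  simp only [List.length_cons, List.length_nil, Nat.zero_add]
  congr 1
  rw [countP_filterMap_if]
  apply List.countP_congr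
  intro a ha
  have ha' : a < h.length + 1 := List.mem_range.mp ha
  have e1 : ((a : Int) - 1 + 1) = (a : Int) := by ring
  rw [e1, PySem.List.pyGetD_natCast]
  have e2 : (h ++ x :: rest).getD a 0 = (h ++ [x]).getD a 0 := by
    by_cases hlt : a < h.length
    · rw [List.getD_append _ _ _ _ hlt, List.getD_append _ _ _ _ hlt]
    · have : a = h.length := by omega
      subst this
      rw [List.getD_append_right _ _ _ _ (le_refl _), List.getD_append_right _ _ _ _ (le_refl _)]
      simp
  have e3 : ((h ++ [x]).take a).sum = (h.take a).sum := by
    rw [List.take_append_of_le_length (by omega)]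
  rw [e2, e3]

theorem getD_append_self (h : List Int) (x : Int) (l : List Int) :
    (h ++ x :: l).getD h.length 0 = x := by
  rw [List.getD_append_right _ _ _ _ (le_refl _)]
  simp

-- ===== the two loop invariants =====

theorem loopB (rest : List Int) :
    ∀ (h : List Int) (cnt : PySem.Dict (Int × Int) Int) (c : Int),
    (∀ s v, cnt.getD (s, v) 0 = countRegs h s v) →
    (rest.foldl countStepB (cnt, h.sum, c)).2.2 = c + specCount h rest := by
  induction rest with
  | nil => intro h cnt c _; simp [specCount]
  | cons x rest ih =>
      intro h cnt c hinv
      rw [List.foldl_cons]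
      have hstep : countStepB (cnt, h.sum, c) x
          = (cnt.insert (h.sum, x) (cnt.getD (h.sum, x) 0 + 1), h.sum + x,
             c + (cnt.insert (h.sum, x) (cnt.getD (h.sum, x) 0 + 1)).getD (h.sum + x, x) 0) := rfl
      rw [hstep]
      set cnt' := cnt.insert (h.sum, x) (cnt.getD (h.sum, x) 0 + 1) with hcnt'
      have hinv' : ∀ s v, cnt'.getD (s, v) 0 = countRegs (h ++ [x]) s v := by
        intro s v
        rw [hcnt', PySem.Dict.getD_insert, countRegs_append]
        by_cases h1 : s = h.sum <;> by_cases h2 : v = x <;>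
          simp [Prod.ext_iff, h1, h2, hinv] <;> omega
      have hsum : h.sum + x = (h ++ [x]).sum := by simp
      rw [hsum]
      rw [ih (h ++ [x]) cnt' _ hinv']
      rw [hinv' (h ++ [x]).sum x]
      simp only [specCount, List.sum_append, List.sum_cons, List.sum_nil, add_zero]
      ring

theorem loopA (t : List Int) (rest : List Int) :
    ∀ (h : List Int) (m : PySem.Dict Int (List Int)) (c : Int),
    t = h ++ rest →
    (∀ s, m.get? s = if regsA h s = [] then none else some (regsA h s)) →
    ((PySem.List.pyRange (h.length : Int) (t.length : Int) 1).foldl (countStepA t)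
        (h.sum, m, c)).2.2 = c + specCount h rest := by
  induction rest with
  | nil =>
      intro h m c ht _
      subst ht
      rw [PySem.List.pyRange_one_eq_nil (by simp)]
      simp [specCount]
  | cons x rest ih =>
      intro h m c ht hinv
      subst ht
      have hlen : ((h ++ x :: rest).length : Int) = (h.length : Int) + rest.length + 1 := by
        push_cast [List.length_append, List.length_cons]; ring
      rw [PySem.List.pyRange_one_cons (by omega), List.foldl_cons]
      have hx : PySem.List.pyGetD (h ++ x :: rest) (h.length : Int) 0 = x := by
        rw [PySem.List.pyGetD_natCast, getD_append_self]
      have hget : m.get? (h.sum + x)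
          = if regsA h (h.sum + x) = [] then none else some (regsA h (h.sum + x)) := hinv _
      have hstep : countStepA (h ++ x :: rest) (h.sum, m, c) ((h.length : Int))
          = (h.sum + x, m.insert (h.sum + x) (regsA h (h.sum + x) ++ [(h.length : Int)]),
             c + countRegs (h ++ [x]) (h.sum + x) x) := by
        unfold countStepA
        simp only [hx, hget]
        by_cases hnil : regsA h (h.sum + x) = []
        · have h0 : countRegs (h ++ [x]) (h.sum + x) x = 0 := by
            rw [← countP_regsA h rest x (h.sum + x), hnil]
            simp
          simp [hnil, h0]
        · rw [if_neg hnil]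
          dsimp only
          rw [foldl_count (regsA h (h.sum + x))
            (fun j => PySem.List.pyGetD (h ++ x :: rest) (j + 1) 0 = x) c]
          rw [countP_regsA h rest x (h.sum + x)]
      rw [hstep]
      have hinv' : ∀ s,
          (m.insert (h.sum + x) (regsA h (h.sum + x) ++ [(h.length : Int)])).get? s
            = if regsA (h ++ [x]) s = [] then none else some (regsA (h ++ [x]) s) := by
        intro s
        rw [PySem.Dict.get?_insert, regsA_append]
        by_cases hc : s = h.sum + x
        · subst hc
          simp
        · have hc' : ¬ (h.sum + x = s) := fun he => hc he.symm
          simp only [if_neg hc, if_neg hc', List.append_nil]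
          exact hinv s
      have hht : h ++ x :: rest = (h ++ [x]) ++ rest := by simp
      have hsum : h.sum + x = (h ++ [x]).sum := by simp
      have hlen' : ((h.length : Int) + 1) = ((h ++ [x]).length : Int) := by
        push_cast [List.length_append, List.length_cons, List.length_nil]; ring
      rw [hsum, hlen']
      rw [hsum] at hinv'
      rw [ih (h ++ [x]) _ _ hht hinv']
      simp only [specCount, List.sum_append, List.sum_cons, List.sum_nil, add_zero]
      ring

theorem count_eq_spec (t : List Int) : count t = specCount [] t := by
  unfold count
  have h0 : ∀ s, ((PySem.Dict.empty : PySem.Dict Int (List Int)).insert 0 [-1]).get? s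
      = if regsA [] s = [] then none else some (regsA [] s) := by
    intro s
    rw [PySem.Dict.get?_insert]
    unfold regsA
    by_cases hs : s = 0
    · subst hs; simp [List.range_succ]
    · have : ¬ ((0 : Int) = s) := fun he => hs he.symm
      simp [hs, this, PySem.Dict.get?_empty]
  have := loopA t t [] ((PySem.Dict.empty : PySem.Dict Int (List Int)).insert 0 [-1]) 0 (by simp) h0
  simpa using this

theorem count_alt_eq_spec (t : List Int) : count_alt t = specCount [] t := by
  unfold count_alt
  have h0 : ∀ s v, (PySem.Dict.empty : PySem.Dict (Int × Int) Int).getD (s, v) 0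
      = countRegs [] s v := by
    intro s v
    unfold countRegs
    simp [PySem.Dict.getD_empty]
  have := loopB t [] (PySem.Dict.empty : PySem.Dict (Int × Int) Int) 0 h0
  simpa using this

-- ===== VERDICT (by name: the statement is the Claim_ definition above) =====
theorem count_spec : Claim_equal_count := by
  intro t _
  unfold Spec_count
  rw [count_eq_spec, count_alt_eq_spec]
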